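-- pv_equiv track=rewrite | github.com/gabrielvpina/bioUtils | genomeContextPlotter.py | merge_proximal_regions
-- ===== SOURCE A (Python) =====
-- def merge_proximal_regions(regions, merge_distance):
--     if not regions:
--         return []
--
--     # Sort regions by start position
--     sorted_regions = sorted(regions, key=lambda x: x[0])
--
--     merged_regions = []
--     current_group = [sorted_regions[0]]
--
--     for region in sorted_regions[1:]:
--         current_start, current_end, _, _ = current_group[-1]
--         next_start, next_end, _, _ = region
--
--         # If this region is close enough to the previous one, add to current group
--         if next_start - current_end <= merge_distance:
--             current_group.append(region)
--         else:
--             # Process the current group and start a new one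
--             merged_regions.append(current_group)
--             current_group = [region]
--
--     # Don't forget the last group
--     if current_group:
--         merged_regions.append(current_group)
--
--     return merged_regions
-- ===== SOURCE B (Python) =====
-- def merge_proximal_regions(regions, merge_distance):
--     # Build the groups back-to-front: scan the sorted regions in reverse and
--     # either prepend the region to the leading group (when close enough to
--     # that group's first region) or open a new leading group.
--     groups = []
--     for r in reversed(sorted(regions, key=lambda x: x[0])):
--         if groups and groups[0][0][0] - r[1] <= merge_distance:
--             groups[0] = [r] + groups[0]
--         else:
--             groups.insert(0, [r])
--     return groups
-- ===== Notes on version B (the rewrite author's own statement) =====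
-- stated objective: alternative
-- what changed: B builds the groups back-to-front: it scans the sorted regions in reverse, prepending each region to the leading group when it is within merge_distance of that group's first region or opening a new leading group, instead of A's forward scan with a current-group accumulator and a final flush.
import Mathlib
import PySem

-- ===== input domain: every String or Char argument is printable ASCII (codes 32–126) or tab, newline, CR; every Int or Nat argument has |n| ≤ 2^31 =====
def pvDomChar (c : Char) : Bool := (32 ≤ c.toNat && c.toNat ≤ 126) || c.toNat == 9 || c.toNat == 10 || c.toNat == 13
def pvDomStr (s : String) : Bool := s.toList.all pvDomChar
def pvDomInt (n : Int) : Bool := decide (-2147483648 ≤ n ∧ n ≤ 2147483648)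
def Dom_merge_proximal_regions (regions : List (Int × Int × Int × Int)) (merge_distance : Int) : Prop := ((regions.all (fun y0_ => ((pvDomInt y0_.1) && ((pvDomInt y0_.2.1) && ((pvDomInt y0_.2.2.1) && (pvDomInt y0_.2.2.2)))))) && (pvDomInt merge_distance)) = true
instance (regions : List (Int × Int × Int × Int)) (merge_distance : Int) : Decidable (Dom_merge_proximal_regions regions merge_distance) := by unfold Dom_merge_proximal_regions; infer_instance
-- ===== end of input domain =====

-- B builds the groups back-to-front in a single reverse scan (prepend to the leading
-- group or open a new one) instead of A's forward accumulator + final flush: a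
-- different decomposition of the same grouping, not faster (objective: alternative).

-- ===== PORT A =====
-- loop body of A: state = (merged_regions, current_group); current_group is never
-- empty, so the getLastD default (current_group[-1]) is never read
def pvStepA (merge_distance : Int)
    (st : List (List (Int × Int × Int × Int)) × List (Int × Int × Int × Int))
    (region : Int × Int × Int × Int) :
    List (List (Int × Int × Int × Int)) × List (Int × Int × Int × Int) :=
  let cur := st.2.getLastD (0, 0, 0, 0)
  -- next_start - current_end <= merge_distance
  if region.1 - cur.2.1 ≤ merge_distance then (st.1, st.2 ++ [region])
  else (st.1 ++ [st.2], [region])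

def merge_proximal_regions (regions : List (Int × Int × Int × Int)) (merge_distance : Int) : List (List (Int × Int × Int × Int)) :=
  if regions = [] then []
  else
    match PySem.List.sorted regions (fun x => x.1) with
    | [] => []  -- unreachable: sorted of a nonempty list is nonempty
    | first :: rest =>
      let st := rest.foldl (pvStepA merge_distance) ([], [first])
      -- if current_group: merged_regions.append(current_group)
      if st.2 = [] then st.1 else st.1 ++ [st.2]

-- ===== PORT B =====
-- loop body of B (one step of the reverse scan): prepend r to the leading group
-- when close enough to its first region, else open a new leading group
def pvStepB (merge_distance : Int) (r : Int × Int × Int × Int)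
    (groups : List (List (Int × Int × Int × Int))) : List (List (Int × Int × Int × Int)) :=
  match groups with
  | [] => [[r]]
  | g :: gs =>
    match g with
    | q :: t => if q.1 - r.2.1 ≤ merge_distance then (r :: q :: t) :: gs else [r] :: (q :: t) :: gs
    | [] => [r] :: [] :: gs  -- unreachable: groups are never empty

def merge_proximal_regions_alt (regions : List (Int × Int × Int × Int)) (merge_distance : Int) : List (List (Int × Int × Int × Int)) :=
  -- for r in reversed(sorted(...)) with front insertion = foldr over the sorted list
  (PySem.List.sorted regions (fun x => x.1)).foldr (pvStepB merge_distance) []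

-- ===== PRECONDITION & SPEC =====
def Spec_merge_proximal_regions (regions : List (Int × Int × Int × Int)) (merge_distance : Int) (out : List (List (Int × Int × Int × Int))) : Prop := out = merge_proximal_regions_alt regions merge_distance
instance (regions : List (Int × Int × Int × Int)) (merge_distance : Int) (out : List (List (Int × Int × Int × Int))) : Decidable (Spec_merge_proximal_regions regions merge_distance out) := by unfold Spec_merge_proximal_regions; infer_instance

-- ===== CLAIM (what is proved, stated in full; the proofs are below) =====
def Claim_equal_merge_proximal_regions : Prop := ∀ (regions : List (Int × Int × Int × Int)) (merge_distance : Int), Dom_merge_proximal_regions regions merge_distance → Spec_merge_proximal_regions regions merge_distance (merge_proximal_regions regions merge_distance)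

-- ===== LEMMAS AND PROOFS =====

-- A's loop from initial accumulator [] and current group c, with the final flush
def pvRun (d : Int) (c : List (Int × Int × Int × Int)) (xs : List (Int × Int × Int × Int)) : List (List (Int × Int × Int × Int)) :=
  let st := xs.foldl (pvStepA d) ([], c)
  st.1 ++ [st.2]

-- prepend c to the first group
def pvPre (c : List (Int × Int × Int × Int)) : List (List (Int × Int × Int × Int)) → List (List (Int × Int × Int × Int))
  | [] => []
  | g :: gs => (c ++ g) :: gs

theorem pvSnd_ne_nil (d : Int) (xs : List (Int × Int × Int × Int))
    (m : List (List (Int × Int × Int × Int))) (c : List (Int × Int × Int × Int)) (hc : c ≠ []) :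
    (xs.foldl (pvStepA d) (m, c)).2 ≠ [] := by
  induction xs generalizing m c with
  | nil => exact hc
  | cons z zs ih =>
    simp only [List.foldl_cons, pvStepA]
    split
    · exact ih _ _ (by simp)
    · exact ih _ _ (by simp)

theorem pvRun_acc (d : Int) (xs : List (Int × Int × Int × Int))
    (m : List (List (Int × Int × Int × Int))) (c : List (Int × Int × Int × Int)) :
    (xs.foldl (pvStepA d) (m, c)).1 ++ [(xs.foldl (pvStepA d) (m, c)).2] = m ++ pvRun d c xs := by
  induction xs generalizing m c with
  | nil => simp [pvRun]
  | cons z zs ih =>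
    simp only [pvRun, List.foldl_cons, pvStepA]
    split
    · rw [ih m (c ++ [z]), ih [] (c ++ [z])]
      simp [pvRun]
    · rw [ih (m ++ [c]) [z], ih ([] ++ [c]) [z]]
      simp [pvRun]

theorem pvRun_ne_nil (d : Int) (c : List (Int × Int × Int × Int)) (xs : List (Int × Int × Int × Int)) :
    pvRun d c xs ≠ [] := by
  simp [pvRun]

theorem pvStepA_concat (d : Int) (m : List (List (Int × Int × Int × Int)))
    (c : List (Int × Int × Int × Int)) (y z : Int × Int × Int × Int) :
    pvStepA d (m, c ++ [y]) z =
      if z.1 - y.2.1 ≤ d then (m, (c ++ [y]) ++ [z]) else (m ++ [c ++ [y]], [z]) := by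
  simp [pvStepA]

theorem pvRun_step (d : Int) (c : List (Int × Int × Int × Int)) (y z : Int × Int × Int × Int)
    (zs : List (Int × Int × Int × Int)) :
    pvRun d (c ++ [y]) (z :: zs) =
      if z.1 - y.2.1 ≤ d then pvRun d (c ++ [y] ++ [z]) zs else (c ++ [y]) :: pvRun d [z] zs := by
  simp only [pvRun, List.foldl_cons, pvStepA_concat]
  split
  · rw [List.append_assoc]
  · rw [pvRun_acc d zs ([] ++ [c ++ [y]]) [z]]
    simp [pvRun]

theorem pvRun_step1 (d : Int) (y z : Int × Int × Int × Int) (zs : List (Int × Int × Int × Int)) :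
    pvRun d [y] (z :: zs) =
      if z.1 - y.2.1 ≤ d then pvRun d ([y] ++ [z]) zs else [y] :: pvRun d [z] zs := by
  have h := pvRun_step d [] y z zs
  simpa using h

theorem pvRun_concat (d : Int) (xs : List (Int × Int × Int × Int))
    (c : List (Int × Int × Int × Int)) (y : Int × Int × Int × Int) :
    pvRun d (c ++ [y]) xs = pvPre c (pvRun d [y] xs) := by
  induction xs generalizing c y with
  | nil => simp [pvRun, pvPre]
  | cons z zs ih =>
    rw [pvRun_step, pvRun_step1]
    by_cases hz : z.1 - y.2.1 ≤ d
    · rw [if_pos hz, if_pos hz, ih [y] z, ih (c ++ [y]) z]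
      cases h : pvRun d [z] zs with
      | nil => exact absurd h (pvRun_ne_nil d [z] zs)
      | cons g gs => simp [pvPre]
    · rw [if_neg hz, if_neg hz]
      simp [pvPre]

theorem pvStepB_head (d : Int) (z : Int × Int × Int × Int) (G : List (List (Int × Int × Int × Int))) :
    ∃ t gs, pvStepB d z G = (z :: t) :: gs := by
  cases G with
  | nil => exact ⟨[], [], rfl⟩
  | cons g gs =>
    cases g with
    | nil => exact ⟨[], [] :: gs, rfl⟩
    | cons q t =>
      by_cases h : q.1 - z.2.1 ≤ d
      · exact ⟨q :: t, gs, by simp [pvStepB, h]⟩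
      · exact ⟨[], (q :: t) :: gs, by simp [pvStepB, h]⟩

theorem pvRun_eq_foldr (d : Int) (xs : List (Int × Int × Int × Int)) (y : Int × Int × Int × Int) :
    pvRun d [y] xs = (y :: xs).foldr (pvStepB d) [] := by
  induction xs generalizing y with
  | nil => simp [pvRun, pvStepB]
  | cons z zs ih =>
    have hz' : (z :: zs).foldr (pvStepB d) [] = pvStepB d z (zs.foldr (pvStepB d) []) := rfl
    obtain ⟨t, gs, ht⟩ := pvStepB_head d z (zs.foldr (pvStepB d) [])
    have hRzs : pvRun d [z] zs = (z :: t) :: gs := by rw [ih z, hz', ht]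
    rw [pvRun_step1, List.foldr_cons, hz', ht]
    by_cases h : z.1 - y.2.1 ≤ d
    · rw [if_pos h, pvRun_concat, hRzs]
      simp [pvPre, pvStepB, h]
    · rw [if_neg h, hRzs]
      simp [pvStepB, h]

-- ===== VERDICT (by name: the statement is the Claim_ definition above) =====
theorem merge_proximal_regions_spec : Claim_equal_merge_proximal_regions := by
  intro regions d _
  unfold Spec_merge_proximal_regions merge_proximal_regions merge_proximal_regions_alt
  by_cases hreg : regions = []
  · subst hreg
    have hnil : PySem.List.sorted ([] : List (Int × Int × Int × Int)) (fun x => x.1) = [] :=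
      (PySem.List.sorted_perm [] (fun x => x.1) false).eq_nil
    rw [if_pos rfl, hnil]
    rfl
  · rw [if_neg hreg]
    cases hs : PySem.List.sorted regions (fun x => x.1) with
    | nil =>
      exact absurd ((hs ▸ PySem.List.sorted_perm regions (fun x => x.1) false).nil_eq.symm) hreg
    | cons first rest =>
      have hne := pvSnd_ne_nil d rest [] [first] (by simp)
      show (if (rest.foldl (pvStepA d) ([], [first])).2 = []
              then (rest.foldl (pvStepA d) ([], [first])).1
              else (rest.foldl (pvStepA d) ([], [first])).1 ++ [(rest.foldl (pvStepA d) ([], [first])).2])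
            = List.foldr (pvStepB d) [] (first :: rest)
      rw [if_neg hne]
      exact pvRun_eq_foldr d rest first
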